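-- pv_equiv track=rewrite | github.com/ahmet000344/Pizza-Sipari-Sistemi | pizz.py | tc_kimlik_no_dogrula
-- ===== SOURCE A (Python) =====
-- def tc_kimlik_no_dogrula(tc_kimlik_no):
--     # Hatalı girdi kontrolü
--     if not tc_kimlik_no.isdigit() or len(tc_kimlik_no) != 11 or tc_kimlik_no[0] == '0':
--         return False
--
--     # 1. 3. 5. 7. ve 9. hanelerin toplamının 7 katı
--     tekler_toplami = sum(int(tc_kimlik_no[i]) for i in range(0, 9, 2))
--     tekler_katlami = tekler_toplami * 7
--
--     # 2. 4. 6. ve 8. hanelerin toplamı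
--     ciftler_toplami = sum(int(tc_kimlik_no[i]) for i in range(1, 9, 2))
--
--     # 10. hanenin kontrolü
--     kontrol1 = (tekler_katlami - ciftler_toplami) % 10
--     if int(tc_kimlik_no[9]) != kontrol1:
--         return False
--
--     # 1-10. hanelerin toplamının 10'a bölümünden kalanın 11. haneyi vermesi gerekiyor
--     toplam = sum(int(tc_kimlik_no[i]) for i in range(10))
--     kontrol2 = toplam % 10
--     if int(tc_kimlik_no[10]) != kontrol2:
--         return False
--
--     return True
-- ===== SOURCE B (Python) =====
-- def tc_kimlik_no_dogrula(tc_kimlik_no):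
--     if not tc_kimlik_no.isdigit() or len(tc_kimlik_no) != 11 or tc_kimlik_no[0] == '0':
--         return False
--     # pack the whole ID into a single integer (Horner), then peel digits
--     # back off arithmetically, right to left
--     n = 0
--     for ch in tc_kimlik_no:
--         n = n * 10 + int(ch)
--     n, d10 = divmod(n, 10)
--     n, d9 = divmod(n, 10)
--     s_odd = 0   # digits at (0-based) indices 0,2,4,6,8
--     s_even = 0  # digits at indices 1,3,5,7
--     total = 0   # digits at indices 0..8
--     for k in range(9):          # k-th peel yields the digit at index 8-k
--         n, d = divmod(n, 10)
--         if k % 2 == 0: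
--             s_odd += d
--         else:
--             s_even += d
--         total += d
--     return d9 == (s_odd * 7 - s_even) % 10 and d10 == (total + d9) % 10
-- ===== Notes on version B (the rewrite author's own statement) =====
-- stated objective: alternative
-- what changed: Instead of A's three index-driven generator scans over the string, B packs the ID into a single integer with one Horner pass and then recovers the digits arithmetically with divmod, peeling right-to-left while maintaining the three checksum accumulators.
import Mathlib
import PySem

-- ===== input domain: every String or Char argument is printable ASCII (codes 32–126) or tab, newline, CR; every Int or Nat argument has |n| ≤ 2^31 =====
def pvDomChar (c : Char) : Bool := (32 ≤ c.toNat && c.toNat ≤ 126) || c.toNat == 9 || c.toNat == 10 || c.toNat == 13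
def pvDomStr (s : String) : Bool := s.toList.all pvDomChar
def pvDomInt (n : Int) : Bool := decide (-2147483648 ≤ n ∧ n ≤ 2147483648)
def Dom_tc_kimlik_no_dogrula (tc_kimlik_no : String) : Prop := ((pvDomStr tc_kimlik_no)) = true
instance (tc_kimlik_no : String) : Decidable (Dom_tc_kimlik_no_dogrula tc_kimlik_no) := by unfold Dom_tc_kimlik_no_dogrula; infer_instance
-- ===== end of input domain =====

-- B replaces A's three index-driven scans of the string by packing the ID into one integer
-- (Horner pass) and peeling the digits back off right-to-left with divmod (objective: alternative).

-- int(c) for a single character c; reachable only on digit characters after the guard,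
-- where ofChars? is some (the .getD 0 branch is never taken on the guarded path)
def pvDigit (c : Char) : Int := (PySem.Int.ofChars? [c]).getD 0

-- ===== PORT A =====
def tc_kimlik_no_dogrula (tc_kimlik_no : String) : Bool :=
  let cs := tc_kimlik_no.toList
  if !(PySem.Chars.strIsdigit cs) || PySem.List.len cs ≠ 11 || PySem.List.pyGetD cs 0 ' ' == '0' then
    false
  else
    let tekler_toplami := ((PySem.List.pyRange 0 9 2).map (fun i => pvDigit (PySem.List.pyGetD cs i ' '))).sum
    let tekler_katlami := tekler_toplami * 7
    let ciftler_toplami := ((PySem.List.pyRange 1 9 2).map (fun i => pvDigit (PySem.List.pyGetD cs i ' '))).sum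
    let kontrol1 := PySem.Int.mod (tekler_katlami - ciftler_toplami) 10
    if pvDigit (PySem.List.pyGetD cs 9 ' ') ≠ kontrol1 then
      false
    else
      let toplam := ((PySem.List.pyRange 0 10 1).map (fun i => pvDigit (PySem.List.pyGetD cs i ' '))).sum
      let kontrol2 := PySem.Int.mod toplam 10
      if pvDigit (PySem.List.pyGetD cs 10 ' ') ≠ kontrol2 then
        false
      else
        true

-- ===== PORT B =====
def tc_kimlik_no_dogrula_alt (tc_kimlik_no : String) : Bool :=
  let cs := tc_kimlik_no.toList
  if !(PySem.Chars.strIsdigit cs) || PySem.List.len cs ≠ 11 || PySem.List.pyGetD cs 0 ' ' == '0' then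
    false
  else
    -- Horner pass: pack the whole ID into one integer
    let n0 := cs.foldl (fun (n : Int) ch => n * 10 + pvDigit ch) 0
    -- peel the two check digits
    let d10 := PySem.Int.mod n0 10
    let n1 := PySem.Int.floordiv n0 10
    let d9 := PySem.Int.mod n1 10
    let n2 := PySem.Int.floordiv n1 10
    -- peel the nine leading digits right-to-left: (n, s_odd, s_even, total)
    let acc := (PySem.List.pyRange 0 9 1).foldl
      (fun (t : Int × Int × Int × Int) k =>
        let d := PySem.Int.mod t.1 10
        let n := PySem.Int.floordiv t.1 10
        if k % 2 == 0 then (n, t.2.1 + d, t.2.2.1, t.2.2.2 + d)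
        else (n, t.2.1, t.2.2.1 + d, t.2.2.2 + d))
      (n2, 0, 0, 0)
    d9 == PySem.Int.mod (acc.2.1 * 7 - acc.2.2.1) 10 && d10 == PySem.Int.mod (acc.2.2.2 + d9) 10

-- ===== PRECONDITION & SPEC =====
def Spec_tc_kimlik_no_dogrula (tc_kimlik_no : String) (out : Bool) : Prop := out = tc_kimlik_no_dogrula_alt tc_kimlik_no
instance (tc_kimlik_no : String) (out : Bool) : Decidable (Spec_tc_kimlik_no_dogrula tc_kimlik_no out) := by unfold Spec_tc_kimlik_no_dogrula; infer_instance

-- ===== CLAIM (what is proved, stated in full; the proofs are below) =====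
def Claim_equal_tc_kimlik_no_dogrula : Prop := ∀ (tc_kimlik_no : String), Dom_tc_kimlik_no_dogrula tc_kimlik_no → Spec_tc_kimlik_no_dogrula tc_kimlik_no (tc_kimlik_no_dogrula tc_kimlik_no)

-- ===== LEMMAS AND PROOFS =====

theorem digit_char_cases (c : Char) (h : PySem.Chars.isdigit c = true) :
    c = '0' ∨ c = '1' ∨ c = '2' ∨ c = '3' ∨ c = '4' ∨ c = '5' ∨ c = '6' ∨ c = '7' ∨ c = '8' ∨ c = '9' := by
  simp only [PySem.Chars.isdigit, Bool.and_eq_true, decide_eq_true_eq] at h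
  obtain ⟨h1, h2⟩ := h
  have hb1 : 48 ≤ c.toNat := h1
  have hb2 : c.toNat ≤ 57 := h2
  have hc : c = Char.ofNat c.toNat := (Char.ofNat_toNat c).symm
  have hv : c.toNat = 48 ∨ c.toNat = 49 ∨ c.toNat = 50 ∨ c.toNat = 51 ∨ c.toNat = 52 ∨ c.toNat = 53 ∨
      c.toNat = 54 ∨ c.toNat = 55 ∨ c.toNat = 56 ∨ c.toNat = 57 := by omega
  rcases hv with h|h|h|h|h|h|h|h|h|h <;> rw [hc, h] <;> decide

theorem pvDigit_lb (c : Char) (h : PySem.Chars.isdigit c = true) : 0 ≤ pvDigit c := by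
  rcases digit_char_cases c h with h|h|h|h|h|h|h|h|h|h <;> subst h <;> decide

theorem pvDigit_ub (c : Char) (h : PySem.Chars.isdigit c = true) : pvDigit c ≤ 9 := by
  rcases digit_char_cases c h with h|h|h|h|h|h|h|h|h|h <;> subst h <;> decide

theorem peel_emod (x d : Int) (h0 : 0 ≤ d) (h9 : d ≤ 9) : (x * 10 + d) % 10 = d := by omega

theorem peel_ediv (x d : Int) (h0 : 0 ≤ d) (h9 : d ≤ 9) : (x * 10 + d) / 10 = x := by omega

-- ===== VERDICT (by name: the statement is the Claim_ definition above) =====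
theorem tc_kimlik_no_dogrula_spec : Claim_equal_tc_kimlik_no_dogrula := by
  intro s _
  unfold Spec_tc_kimlik_no_dogrula
  by_cases h11 : s.toList.length = 11
  · have h9 : PySem.List.pyRange 0 9 2 = [0,2,4,6,8] := by decide
    have h19 : PySem.List.pyRange 1 9 2 = [1,3,5,7] := by decide
    have h10 : PySem.List.pyRange 0 10 1 = [0,1,2,3,4,5,6,7,8,9] := by decide
    have h091 : PySem.List.pyRange 0 9 1 = [0,1,2,3,4,5,6,7,8] := by decide
    rcases hcs : s.toList with _ | ⟨c0, _ | ⟨c1, _ | ⟨c2, _ | ⟨c3, _ | ⟨c4, _ | ⟨c5, _ | ⟨c6, _ | ⟨c7, _ | ⟨c8, _ | ⟨c9, _ | ⟨c10, _ | ⟨c11, t⟩⟩⟩⟩⟩⟩⟩⟩⟩⟩⟩⟩ <;>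
      simp_all only [List.length_nil, List.length_cons]
    · omega
    all_goals try omega
    -- the 11-character case
    by_cases hguard : (PySem.Chars.strIsdigit [c0,c1,c2,c3,c4,c5,c6,c7,c8,c9,c10]) = true ∧ ¬ c0 = '0'
    · obtain ⟨hdig, hc0⟩ := hguard
      have hall := hdig
      simp only [PySem.Chars.strIsdigit, List.all_cons, List.all_nil, Bool.and_eq_true,
        List.isEmpty_cons, Bool.not_false, true_and, and_true] at hall
      obtain ⟨g0, g1, g2, g3, g4, g5, g6, g7, g8, g9, g10⟩ := hall
      simp only [tc_kimlik_no_dogrula, tc_kimlik_no_dogrula_alt, hcs]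
      simp [h9, h19, h10, h091, hdig, hc0, PySem.List.len, PySem.List.pyGetD,
        PySem.List.pyGet?, PySem.List.pyIdx?]
      have b0l := pvDigit_lb c0 g0; have b0u := pvDigit_ub c0 g0
      have b1l := pvDigit_lb c1 g1; have b1u := pvDigit_ub c1 g1
      have b2l := pvDigit_lb c2 g2; have b2u := pvDigit_ub c2 g2
      have b3l := pvDigit_lb c3 g3; have b3u := pvDigit_ub c3 g3
      have b4l := pvDigit_lb c4 g4; have b4u := pvDigit_ub c4 g4
      have b5l := pvDigit_lb c5 g5; have b5u := pvDigit_ub c5 g5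
      have b6l := pvDigit_lb c6 g6; have b6u := pvDigit_ub c6 g6
      have b7l := pvDigit_lb c7 g7; have b7u := pvDigit_ub c7 g7
      have b8l := pvDigit_lb c8 g8; have b8u := pvDigit_ub c8 g8
      have b9l := pvDigit_lb c9 g9; have b9u := pvDigit_ub c9 g9
      have b10l := pvDigit_lb c10 g10; have b10u := pvDigit_ub c10 g10
      simp only [peel_ediv _ _ b10l b10u,
        peel_emod _ _ b9l b9u, peel_ediv _ _ b9l b9u,
        peel_emod _ _ b8l b8u, peel_ediv _ _ b8l b8u,
        peel_emod _ _ b7l b7u, peel_ediv _ _ b7l b7u,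
        peel_emod _ _ b6l b6u, peel_ediv _ _ b6l b6u,
        peel_emod _ _ b5l b5u, peel_ediv _ _ b5l b5u,
        peel_emod _ _ b4l b4u, peel_ediv _ _ b4l b4u,
        peel_emod _ _ b3l b3u, peel_ediv _ _ b3l b3u,
        peel_emod _ _ b2l b2u, peel_ediv _ _ b2l b2u,
        peel_emod _ _ b1l b1u, peel_ediv _ _ b1l b1u]
      rw [Bool.eq_iff_iff]
      simp only [Bool.and_eq_true, decide_eq_true_eq, beq_iff_eq]
      omega
    · rw [Classical.not_and_iff_not_or_not, not_not] at hguard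
      rcases hguard with hd | hc0
      · rw [Bool.not_eq_true] at hd
        simp [tc_kimlik_no_dogrula, tc_kimlik_no_dogrula_alt, hcs, hd]
      · simp [tc_kimlik_no_dogrula, tc_kimlik_no_dogrula_alt, hcs, hc0,
          PySem.List.pyGetD, PySem.List.pyGet?, PySem.List.pyIdx?]
  · have hlen : ((s.length : Int) ≠ 11) := by
      rw [String.length_toList] at h11; exact_mod_cast h11
    simp [tc_kimlik_no_dogrula, tc_kimlik_no_dogrula_alt, hlen]
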